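-- pv_equiv track=rewrite | github.com/AnChanUng/Algorithm | 프로그래머스/1/42748. K번째수/K번째수.py | solution
-- ===== SOURCE A (Python) =====
-- def solution(array, commands):
--     result = []
--     total = []
--     for i in range(len(commands)):
--         result = array[commands[i][0]-1:commands[i][1]]
--         result.sort()
--         total.append(result[commands[i][2]-1])
--
--     return total
-- ===== SOURCE B (Python) =====
-- def solution(array, commands):
--     total = []
--     for cmd in commands:
--         a, b, k = cmd[0], cmd[1], cmd[2]
--         best = []  # sorted buffer holding the k smallest elements seen so far
--         for x in array[a-1:b]:
--             if len(best) < k or x < best[-1]: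
--                 j = len(best)
--                 while j > 0 and best[j-1] > x:
--                     j -= 1
--                 best.insert(j, x)
--                 if len(best) > k:
--                     best.pop()
--         total.append(best[-1])
--     return total
-- ===== Notes on version B (the rewrite author's own statement) =====
-- stated objective: alternative
-- what changed: Instead of fully sorting each slice and indexing the kth element, B streams the slice once through a bounded sorted buffer of the k smallest seen so far (insert in order, drop the largest when it overflows) and reads the buffer's last element; no per-query full sort is ever built.
-- outside the precondition, e.g. on solution([1, 2, 3], [[1, 3, 0]]): A returns [3], B raises IndexError
import Mathlib
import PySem

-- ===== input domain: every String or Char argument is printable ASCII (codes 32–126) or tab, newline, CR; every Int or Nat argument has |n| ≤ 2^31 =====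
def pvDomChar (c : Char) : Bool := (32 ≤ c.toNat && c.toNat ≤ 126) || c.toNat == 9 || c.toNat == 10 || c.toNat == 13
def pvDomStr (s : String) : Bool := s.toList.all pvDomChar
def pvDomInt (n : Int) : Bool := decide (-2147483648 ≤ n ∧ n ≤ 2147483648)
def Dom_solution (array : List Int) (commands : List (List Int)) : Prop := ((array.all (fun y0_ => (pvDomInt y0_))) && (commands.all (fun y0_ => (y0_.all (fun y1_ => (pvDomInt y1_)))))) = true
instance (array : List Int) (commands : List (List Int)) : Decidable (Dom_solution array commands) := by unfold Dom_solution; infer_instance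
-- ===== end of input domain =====

-- B replaces A's per-query "sort the whole slice, index the kth" by a single pass over the
-- slice maintaining a bounded sorted buffer of the k smallest elements seen so far; same
-- return value on all valid queries (equivalence is about the return value only).

-- ===== PORT A =====
def solution (array : List Int) (commands : List (List Int)) : List Int :=
  (PySem.List.pyRange 0 (commands.length : Int) 1).foldl (fun total i =>
    let c := PySem.List.pyGetD commands i []  -- commands[i] (in range over the loop)
    let result := PySem.List.sorted
      (PySem.List.slice array (some (PySem.List.pyGetD c 0 0 - 1)) (some (PySem.List.pyGetD c 1 0)))
      (fun v => v) false
    total ++ [PySem.List.pyGetD result (PySem.List.pyGetD c 2 0 - 1) 0]) []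

-- ===== PORT B =====
-- ordered insert into the (always sorted) buffer: Python B scans backwards with
-- `while j > 0 and best[j-1] > x` and inserts at j; on a sorted buffer that position is
-- exactly "before the first element strictly greater than x", which this front scan computes.
def insOrd (x : Int) : List Int → List Int
  | [] => [x]
  | y :: ys => if x < y then x :: y :: ys else y :: insOrd x ys

-- one step of B's inner loop (Python's `best[-1]` on an empty buffer raises; that needs
-- k ≤ 0, which Pre_solution excludes, so the default 0 is never the computed value there)
def bstep (k : Int) (best : List Int) (x : Int) : List Int :=
  if (best.length : Int) < k ∨ x < PySem.List.pyGetD best (-1) 0 then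
    let b2 := insOrd x best
    if k < (b2.length : Int) then b2.dropLast else b2
  else best

def solution_alt (array : List Int) (commands : List (List Int)) : List Int :=
  commands.foldl (fun total c =>
    let k := PySem.List.pyGetD c 2 0
    let best := (PySem.List.slice array (some (PySem.List.pyGetD c 0 0 - 1))
                  (some (PySem.List.pyGetD c 1 0))).foldl (bstep k) []
    total ++ [PySem.List.pyGetD best (-1) 0]) []

-- ===== PRECONDITION & SPEC =====
-- Pre_ excludes commands with fewer than 3 entries and commands whose k is not a valid
-- 1-based rank of the slice: for k > len(slice) A raises IndexError, and for k ≤ 0 A's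
-- returned value comes from Python's negative-index wraparound on the sorted slice, where
-- B's own selection naturally raises IndexError.
def Pre_solution (array : List Int) (commands : List (List Int)) : Prop :=
  ∀ c ∈ commands, 3 ≤ c.length ∧ 1 ≤ PySem.List.pyGetD c 2 0 ∧
    PySem.List.pyGetD c 2 0 ≤ ((PySem.List.slice array (some (PySem.List.pyGetD c 0 0 - 1))
      (some (PySem.List.pyGetD c 1 0))).length : Int)
instance (array : List Int) (commands : List (List Int)) : Decidable (Pre_solution array commands) := by
  unfold Pre_solution; infer_instance

def pvWitness_solution : List Int × List (List Int) :=
  ([1, 5, 2, 6, 3, 7, 4], [[2, 5, 3], [4, 4, 1], [1, 7, 3]])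

def Spec_solution (array : List Int) (commands : List (List Int)) (out : List Int) : Prop := out = solution_alt array commands
instance (array : List Int) (commands : List (List Int)) (out : List Int) : Decidable (Spec_solution array commands out) := by unfold Spec_solution; infer_instance

-- ===== CLAIM (what is proved, stated in full; the proofs are below) =====
def Claim_equal_solution : Prop := ∀ (array : List Int) (commands : List (List Int)), Dom_solution array commands → Pre_solution array commands → Spec_solution array commands (solution array commands)

-- ===== LEMMAS AND PROOFS =====

theorem insOrd_length (x : Int) (l : List Int) : (insOrd x l).length = l.length + 1 := by
  induction l with
  | nil => rfl
  | cons y ys ih => simp only [insOrd]; split <;> simp [ih]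

theorem insOrd_ne_nil (x : Int) (l : List Int) : insOrd x l ≠ [] := by
  have := insOrd_length x l
  intro h; rw [h] at this; simp at this

theorem insOrd_perm (x : Int) (l : List Int) : (insOrd x l).Perm (x :: l) := by
  induction l with
  | nil => rfl
  | cons y ys ih =>
    simp only [insOrd]; split
    · exact List.Perm.refl _
    · exact (ih.cons y).trans (List.Perm.swap x y ys)

theorem insOrd_pairwise (x : Int) (l : List Int) (h : l.Pairwise (· ≤ ·)) :
    (insOrd x l).Pairwise (· ≤ ·) := by
  induction l with
  | nil => simp [insOrd]
  | cons y ys ih =>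
    rw [List.pairwise_cons] at h
    simp only [insOrd]; split
    · rename_i hxy
      refine List.pairwise_cons.2 ⟨?_, List.pairwise_cons.2 h⟩
      intro z hz
      rcases List.mem_cons.mp hz with rfl | hz2
      · exact le_of_lt hxy
      · exact le_trans (le_of_lt hxy) (h.1 z hz2)
    · rename_i hxy
      refine List.pairwise_cons.2 ⟨?_, ih h.2⟩
      intro z hz
      rcases List.mem_cons.mp ((insOrd_perm x ys).mem_iff.mp hz) with rfl | hz2
      · omega
      · exact h.1 z hz2

-- sorted (t ++ [x]) grows by one ordered insertion
theorem sorted_append_singleton (t : List Int) (x : Int) :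
    PySem.List.sorted (t ++ [x]) (fun v => v) false = insOrd x (PySem.List.sorted t (fun v => v) false) := by
  apply PySem.List.sorted_id_eq_of_perm_of_pairwise
  · exact ((insOrd_perm x _).trans ((PySem.List.sorted_perm t _ false).cons x)).trans
      (List.perm_append_singleton x t).symm
  · exact insOrd_pairwise x _ (PySem.List.sorted_pairwise t (fun v => v))

theorem dropLast_cons_take (y : Int) (ys : List Int) (m : Nat) (hm : m ≤ ys.length) :
    (y :: ys.take m).dropLast = (y :: ys).take m := by
  rcases Nat.lt_or_ge m ys.length with h | h
  · have hty : y :: ys.take m = (y :: ys).take (m + 1) := by simp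
    rw [hty, List.dropLast_take (by simpa using Nat.succ_lt_succ h)]
    simp
  · have hm2 : m = ys.length := le_antisymm hm h
    subst hm2
    rw [List.take_length, List.dropLast_eq_take]
    simp

-- if something in the first n elements beats x, the insertion lands inside the window
theorem take_insOrd_of_exists_lt (x : Int) :
    ∀ (s : List Int) (n : Nat), n ≤ s.length → (∃ z ∈ s.take n, x < z) →
      (insOrd x s).take n = (insOrd x (s.take n)).dropLast := by
  intro s
  induction s with
  | nil => intro n _ h; simp at h
  | cons y ys ih =>
    intro n hn hex
    cases n with
    | zero => simp at hex
    | succ m =>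
      simp only [List.take_succ_cons] at hex ⊢
      simp only [insOrd]
      by_cases hxy : x < y
      · simp only [if_pos hxy, List.take_succ_cons, List.dropLast_cons₂]
        congr 1
        exact (dropLast_cons_take y ys m (by simpa using hn)).symm
      · simp only [if_neg hxy, List.take_succ_cons]
        have hz : ∃ z ∈ ys.take m, x < z := by
          rcases hex with ⟨z, hz, hxz⟩
          rcases List.mem_cons.mp hz with rfl | hz2
          · omega
          · exact ⟨z, hz2, hxz⟩
        rw [ih m (by simpa using hn) hz,
          List.dropLast_cons_of_ne_nil (insOrd_ne_nil x (ys.take m))]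

-- if nothing in the first n elements beats x, the window is untouched
theorem take_insOrd_of_forall_le (x : Int) :
    ∀ (s : List Int) (n : Nat), n ≤ s.length → (∀ z ∈ s.take n, ¬ x < z) →
      (insOrd x s).take n = s.take n := by
  intro s
  induction s with
  | nil => intro n hn _; simp at hn; simp [hn, insOrd]
  | cons y ys ih =>
    intro n hn hall
    cases n with
    | zero => simp
    | succ m =>
      simp only [insOrd]
      by_cases hxy : x < y
      · exact absurd hxy (hall y (by simp))
      · simp only [if_neg hxy, List.take_succ_cons]
        rw [ih m (by simpa using hn) (fun z hz => hall z (by simp [hz]))]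

-- one bstep on the window of a sorted list is ordered-insert-then-rewindow
theorem bstep_take (s : List Int) (k : Int) (x : Int) (hk : 1 ≤ k)
    (hs : s.Pairwise (· ≤ ·)) :
    bstep k (s.take k.toNat) x = (insOrd x s).take k.toNat := by
  set n := k.toNat with hn
  have hkn : (n : Int) = k := by omega
  by_cases hlen : s.length < n
  · have hB : s.take n = s := List.take_of_length_le (by omega)
    rw [hB]
    unfold bstep
    rw [if_pos (Or.inl (by omega))]
    have h2 : ¬ k < ((insOrd x s).length : Int) := by
      rw [insOrd_length]; push_cast; omega
    simp only [h2, if_false]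
    exact (List.take_of_length_le (by rw [insOrd_length]; omega)).symm
  · have hns : n ≤ s.length := by omega
    have hlB : (s.take n).length = n := by simp; omega
    have hBne : s.take n ≠ [] := by
      intro h; rw [h] at hlB; simp at hlB; omega
    have hlast := PySem.List.pyGetD_neg_one (s.take n) 0 hBne
    by_cases hx : x < (s.take n).getLast hBne
    · unfold bstep
      rw [if_pos (Or.inr (by rw [hlast]; exact hx))]
      have h2 : k < ((insOrd x (s.take n)).length : Int) := by
        rw [insOrd_length, hlB]; omega
      simp only [h2, if_true]
      exact (take_insOrd_of_exists_lt x s n hns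
        ⟨(s.take n).getLast hBne, List.getLast_mem hBne, hx⟩).symm
    · unfold bstep
      rw [if_neg]
      · refine (take_insOrd_of_forall_le x s n hns ?_).symm
        intro z hz hxz
        have hzle : z ≤ (s.take n).getLast hBne := by
          have hsort : (s.take n).Pairwise (· ≤ ·) := hs.sublist (List.take_sublist n s)
          rcases eq_or_ne z ((s.take n).getLast hBne) with h | h
          · exact le_of_eq h
          · have := List.getLast_eq_getElem hBne
            rw [this]
            rcases List.getElem_of_mem hz with ⟨i, hi, rfl⟩
            rcases Nat.lt_or_ge i ((s.take n).length - 1) with hlt | hge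
            · exact List.pairwise_iff_getElem.mp hsort i _ (by omega) (by omega) hlt
            · have : i = (s.take n).length - 1 := by omega
              subst this; exact le_refl _
        omega
      · rw [hlast, hlB]
        rintro (hc | hc)
        · omega
        · exact hx hc

-- B's inner loop computes exactly the first k elements of the sorted slice
theorem buffer_eq (t : List Int) (k : Int) (hk : 1 ≤ k) :
    t.foldl (bstep k) [] = (PySem.List.sorted t (fun v => v) false).take k.toNat := by
  induction t using List.reverseRecOn with
  | nil =>
    rw [List.Perm.eq_nil (PySem.List.sorted_perm ([] : List Int) (fun v => v) false)]
    simp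
  | append_singleton t x ih =>
    rw [List.foldl_append, List.foldl_cons, List.foldl_nil, ih,
      bstep_take _ _ _ hk (PySem.List.sorted_pairwise t (fun v => v)),
      sorted_append_singleton]

-- per-command agreement: A's kth of the sorted slice = B's buffer's last element
theorem percmd (array : List Int) (c : List Int)
    (hk1 : 1 ≤ PySem.List.pyGetD c 2 0)
    (hk2 : PySem.List.pyGetD c 2 0 ≤ ((PySem.List.slice array (some (PySem.List.pyGetD c 0 0 - 1))
      (some (PySem.List.pyGetD c 1 0))).length : Int)) :
    PySem.List.pyGetD (PySem.List.sorted
        (PySem.List.slice array (some (PySem.List.pyGetD c 0 0 - 1)) (some (PySem.List.pyGetD c 1 0)))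
        (fun v => v) false) (PySem.List.pyGetD c 2 0 - 1) 0 =
    PySem.List.pyGetD ((PySem.List.slice array (some (PySem.List.pyGetD c 0 0 - 1))
        (some (PySem.List.pyGetD c 1 0))).foldl (bstep (PySem.List.pyGetD c 2 0)) []) (-1) 0 := by
  set k := PySem.List.pyGetD c 2 0 with hkdef
  set t := PySem.List.slice array (some (PySem.List.pyGetD c 0 0 - 1)) (some (PySem.List.pyGetD c 1 0)) with htdef
  set S := PySem.List.sorted t (fun v => v) false with hSdef
  have hlenS : S.length = t.length := PySem.List.length_sorted t _ false
  have hn : k.toNat ≤ S.length := by omega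
  have hlT : (S.take k.toNat).length = k.toNat := by simp; omega
  have hTne : S.take k.toNat ≠ [] := by
    intro h; rw [h] at hlT; simp at hlT; omega
  rw [buffer_eq t k hk1, PySem.List.pyGetD_neg_one _ 0 hTne,
    PySem.List.pyGetD_eq_getElem S 0 (by omega) (by omega),
    List.getLast_eq_getElem hTne]
  rw [List.getElem_take]
  congr 1
  omega

-- ===== VERDICT (by name: the statement is the Claim_ definition above) =====
theorem solution_spec : Claim_equal_solution := by
  intro array commands _ hpre
  unfold Spec_solution solution solution_alt
  rw [PySem.List.foldl_pyRange_zero_pyGetD' commands []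
    (fun total c => total ++ [PySem.List.pyGetD (PySem.List.sorted
      (PySem.List.slice array (some (PySem.List.pyGetD c 0 0 - 1)) (some (PySem.List.pyGetD c 1 0)))
      (fun v => v) false) (PySem.List.pyGetD c 2 0 - 1) 0]) []]
  rw [PySem.List.foldl_append_singleton_eq_map, PySem.List.foldl_append_singleton_eq_map]
  simp only [List.nil_append]
  apply List.map_congr_left
  intro c hc
  exact percmd array c (hpre c hc).2.1 (hpre c hc).2.2
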